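-- pv_equiv track=rewrite | github.com/StanHoevenHU/MasterMind | MasterMind.py | create_all_possible
-- ===== SOURCE A (Python) =====
-- def create_all_possible(colors):
--     """
--     Generen van alle mogelijken antwoorden.
--     """
--
--     possibilities = list()
--
--     for first_color in range(len(colors)):
--         for second_color in range(len(colors)):
--             for third_color in range(len(colors)):
--                 for forth_color in range(len(colors)):
--                     possibilities.append([colors.copy()[first_color],colors.copy()[second_color],colors.copy()[third_color],colors.copy()[forth_color]])
--
--     return possibilities
-- ===== SOURCE B (Python) =====
-- def create_all_possible(colors):
--     """
--     Generen van alle mogelijken antwoorden.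
--     """
--     result = [[]]
--     for _ in range(4):
--         result = [prefix + [c] for prefix in result for c in colors]
--     return result
-- ===== Notes on version B (the rewrite author's own statement) =====
-- stated objective: simpler
-- what changed: Replaces four fixed index-nested loops (each re-copying the list to index it) with an iterative frontier of partial tuples extended one position per round, in the same prefix-major order.
import Mathlib
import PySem

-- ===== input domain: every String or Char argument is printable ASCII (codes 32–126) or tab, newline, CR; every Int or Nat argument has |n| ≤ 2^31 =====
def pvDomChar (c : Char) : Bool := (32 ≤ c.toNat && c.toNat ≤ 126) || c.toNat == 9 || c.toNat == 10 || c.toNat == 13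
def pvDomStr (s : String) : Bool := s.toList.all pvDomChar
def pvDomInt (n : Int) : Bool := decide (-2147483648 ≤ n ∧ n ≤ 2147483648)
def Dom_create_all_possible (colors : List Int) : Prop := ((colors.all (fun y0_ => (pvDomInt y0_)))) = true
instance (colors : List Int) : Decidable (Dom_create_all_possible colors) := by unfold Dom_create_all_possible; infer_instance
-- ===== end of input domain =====

-- B replaces A's four fixed index-nested loops with an iterative frontier of partial tuples
-- extended one position per round (same order, same values); objective: simpler.


-- ===== PORT A =====
def create_all_possible (colors : List Int) : List (List Int) :=
  ((PySem.List.pyRange 0 (PySem.List.len colors) 1).foldl (fun possibilities first_color =>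
    (PySem.List.pyRange 0 (PySem.List.len colors) 1).foldl (fun possibilities second_color =>
      (PySem.List.pyRange 0 (PySem.List.len colors) 1).foldl (fun possibilities third_color =>
        (PySem.List.pyRange 0 (PySem.List.len colors) 1).foldl (fun possibilities forth_color =>
          -- possibilities.append(...) is O(1) amortised: Array.push; each index comes from
          -- range(len(colors)), so colors.copy()[i] never raises and pyGetD is exact there
          -- (list.copy() does not change the value read)
          possibilities.push [PySem.List.pyGetD colors first_color 0, PySem.List.pyGetD colors second_color 0,
                              PySem.List.pyGetD colors third_color 0, PySem.List.pyGetD colors forth_color 0])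
          possibilities) possibilities) possibilities) #[]).toList

-- ===== PORT B =====
def create_all_possible_alt (colors : List Int) : List (List Int) :=
  (List.range 4).foldl (fun result _ =>
    result.flatMap (fun pre => colors.map (fun c => pre ++ [c]))) [[]]

-- ===== PRECONDITION & SPEC =====
def Spec_create_all_possible (colors : List Int) (out : List (List Int)) : Prop := out = create_all_possible_alt colors
instance (colors : List Int) (out : List (List Int)) : Decidable (Spec_create_all_possible colors out) := by unfold Spec_create_all_possible; infer_instance

-- ===== CLAIM (what is proved, stated in full; the proofs are below) =====
def Claim_equal_create_all_possible : Prop := ∀ (colors : List Int), Dom_create_all_possible colors → Spec_create_all_possible colors (create_all_possible colors)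

-- ===== LEMMAS AND PROOFS =====

-- library citations specialised to this file: resolving "for i in range(len(colors)): ... colors[i]"
-- into a traversal of colors itself, for a flatMap body and for a map body
lemma key_map {β : Type} (xs : List Int) (F : Int → β) :
    (PySem.List.pyRange 0 (PySem.List.len xs)).map (fun i => F (PySem.List.pyGetD xs i 0)) = xs.map F := by
  conv_rhs => rw [← PySem.List.map_pyGetD_pyRange_zero' (xs := xs) (d := 0)]
  rw [List.map_map]
  rfl

lemma key {β : Type} (xs : List Int) (F : Int → List β) :
    (PySem.List.pyRange 0 (PySem.List.len xs)).flatMap (fun i => F (PySem.List.pyGetD xs i 0)) = xs.flatMap F := by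
  conv_rhs => rw [← PySem.List.map_pyGetD_pyRange_zero' (xs := xs) (d := 0)]
  rw [List.flatMap_map]
  rfl

-- a loop that pushes onto an Array is the same loop appending to the Array's list image
lemma foldl_toList {α β : Type} (l : List α) (F : Array β → α → Array β) (G : List β → α → List β)
    (h : ∀ (a : Array β) (x : α), (F a x).toList = G a.toList x) (arr : Array β) :
    (l.foldl F arr).toList = l.foldl G arr.toList := by
  induction l generalizing arr with
  | nil => rfl
  | cons y t ih => simp only [List.foldl_cons]; rw [ih, h]

-- A's four index loops, with pushes turned into appends and indexing resolved,
-- are the 4-fold flatMap product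
lemma portA_eq_flatMap (colors : List Int) :
    create_all_possible colors =
      colors.flatMap (fun a => colors.flatMap (fun b => colors.flatMap (fun c =>
        colors.map (fun d => [a, b, c, d])))) := by
  have h3 : ∀ (i j : Int) (a : Array (List Int)) (k : Int),
      ((PySem.List.pyRange 0 (PySem.List.len colors) 1).foldl (fun p l => p.push [PySem.List.pyGetD colors i 0, PySem.List.pyGetD colors j 0, PySem.List.pyGetD colors k 0, PySem.List.pyGetD colors l 0]) a).toList
        = (PySem.List.pyRange 0 (PySem.List.len colors) 1).foldl (fun p l => p ++ [[PySem.List.pyGetD colors i 0, PySem.List.pyGetD colors j 0, PySem.List.pyGetD colors k 0, PySem.List.pyGetD colors l 0]]) a.toList :=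
    fun i j a k => foldl_toList _ _ _ (fun a l => Array.toList_push) a
  have h2 : ∀ (i : Int) (a : Array (List Int)) (j : Int),
      ((PySem.List.pyRange 0 (PySem.List.len colors) 1).foldl (fun p k => (PySem.List.pyRange 0 (PySem.List.len colors) 1).foldl (fun p l => p.push [PySem.List.pyGetD colors i 0, PySem.List.pyGetD colors j 0, PySem.List.pyGetD colors k 0, PySem.List.pyGetD colors l 0]) p) a).toList
        = (PySem.List.pyRange 0 (PySem.List.len colors) 1).foldl (fun p k => (PySem.List.pyRange 0 (PySem.List.len colors) 1).foldl (fun p l => p ++ [[PySem.List.pyGetD colors i 0, PySem.List.pyGetD colors j 0, PySem.List.pyGetD colors k 0, PySem.List.pyGetD colors l 0]]) p) a.toList :=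
    fun i a j => foldl_toList _ _ _ (h3 i j) a
  have h1 : ∀ (a : Array (List Int)) (i : Int),
      ((PySem.List.pyRange 0 (PySem.List.len colors) 1).foldl (fun p j => (PySem.List.pyRange 0 (PySem.List.len colors) 1).foldl (fun p k => (PySem.List.pyRange 0 (PySem.List.len colors) 1).foldl (fun p l => p.push [PySem.List.pyGetD colors i 0, PySem.List.pyGetD colors j 0, PySem.List.pyGetD colors k 0, PySem.List.pyGetD colors l 0]) p) p) a).toList
        = (PySem.List.pyRange 0 (PySem.List.len colors) 1).foldl (fun p j => (PySem.List.pyRange 0 (PySem.List.len colors) 1).foldl (fun p k => (PySem.List.pyRange 0 (PySem.List.len colors) 1).foldl (fun p l => p ++ [[PySem.List.pyGetD colors i 0, PySem.List.pyGetD colors j 0, PySem.List.pyGetD colors k 0, PySem.List.pyGetD colors l 0]]) p) p) a.toList :=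
    fun a i => foldl_toList _ _ _ (h2 i) a
  have h0 : create_all_possible colors
      = (PySem.List.pyRange 0 (PySem.List.len colors) 1).foldl (fun p i => (PySem.List.pyRange 0 (PySem.List.len colors) 1).foldl (fun p j => (PySem.List.pyRange 0 (PySem.List.len colors) 1).foldl (fun p k => (PySem.List.pyRange 0 (PySem.List.len colors) 1).foldl (fun p l => p ++ [[PySem.List.pyGetD colors i 0, PySem.List.pyGetD colors j 0, PySem.List.pyGetD colors k 0, PySem.List.pyGetD colors l 0]]) p) p) p) [] :=
    foldl_toList _ _ _ h1 #[]
  rw [h0]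
  simp only [PySem.List.foldl_append_singleton_eq_map, PySem.List.foldl_append_eq_flatMap,
    List.nil_append]
  exact (key colors (fun a =>
      (PySem.List.pyRange 0 (PySem.List.len colors)).flatMap (fun j =>
        (PySem.List.pyRange 0 (PySem.List.len colors)).flatMap (fun k =>
          (PySem.List.pyRange 0 (PySem.List.len colors)).map (fun l =>
            [a, PySem.List.pyGetD colors j 0, PySem.List.pyGetD colors k 0,
             PySem.List.pyGetD colors l 0]))))).trans <|
    congrArg (fun F => List.flatMap F colors) <| funext fun a =>
      (key colors (fun b =>
          (PySem.List.pyRange 0 (PySem.List.len colors)).flatMap (fun k =>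
            (PySem.List.pyRange 0 (PySem.List.len colors)).map (fun l =>
              [a, b, PySem.List.pyGetD colors k 0, PySem.List.pyGetD colors l 0])))).trans <|
        congrArg (fun F => List.flatMap F colors) <| funext fun b =>
          (key colors (fun c =>
              (PySem.List.pyRange 0 (PySem.List.len colors)).map (fun l =>
                [a, b, c, PySem.List.pyGetD colors l 0]))).trans <|
            congrArg (fun F => List.flatMap F colors) <| funext fun c =>
              key_map colors (fun d => [a, b, c, d])

-- B's four frontier-extension rounds compute the same 4-fold flatMap product
lemma portB_eq_flatMap (colors : List Int) :
    create_all_possible_alt colors =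
      colors.flatMap (fun a => colors.flatMap (fun b => colors.flatMap (fun c =>
        colors.map (fun d => [a, b, c, d])))) := by
  unfold create_all_possible_alt
  simp [List.range_succ, List.flatMap_map, List.flatMap_assoc]

-- ===== VERDICT (by name: the statement is the Claim_ definition above) =====
theorem create_all_possible_spec : Claim_equal_create_all_possible := by
  intro colors _
  unfold Spec_create_all_possible
  rw [portA_eq_flatMap, portB_eq_flatMap]
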